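-- pv_equiv track=rewrite | github.com/BuildThingsThatBuildthings/ai-acceleration-sales-dashboard | execution/audit_all_crm_rows.py | check_email_issues
-- ===== SOURCE A (Python) =====
-- BAD_EMAIL_PREFIXES = [
--     'info@', 'contact@', 'office@', 'admin@', 'hello@', 'team@',
--     'sales@', 'support@', 'general@', 'inquiries@', 'mail@'
-- ]
--
-- def check_email_issues(email):
--     """Check if email is generic."""
--     issues = []
--     email_lower = email.lower().strip()
--
--     for prefix in BAD_EMAIL_PREFIXES:
--         if email_lower.startswith(prefix):
--             issues.append(f"Generic email prefix '{prefix}': '{email}'")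
--             break
--
--     if not email.strip():
--         issues.append("Email is empty")
--
--     return issues
-- ===== SOURCE B (Python) =====
-- BAD_EMAIL_KEYS = frozenset([
--     'info@', 'contact@', 'office@', 'admin@', 'hello@', 'team@',
--     'sales@', 'support@', 'general@', 'inquiries@', 'mail@'
-- ])
--
--
-- def check_email_issues(email):
--     """Check if email is generic."""
--     issues = []
--     email_lower = email.lower().strip()
--     at = email_lower.find('@')
--     if at != -1:
--         key = email_lower[:at + 1]
--         if key in BAD_EMAIL_KEYS:
--             issues.append(f"Generic email prefix '{key}': '{email}'")
--     if not email.strip():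
--         issues.append("Email is empty")
--     return issues
-- ===== Notes on version B (the rewrite author's own statement) =====
-- stated objective: simpler
-- what changed: Replaces the per-prefix startswith scan (with break) by extracting the local-part key up to and including the first '@' once (find + slice) and testing it with a single frozenset membership lookup.
import Mathlib
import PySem

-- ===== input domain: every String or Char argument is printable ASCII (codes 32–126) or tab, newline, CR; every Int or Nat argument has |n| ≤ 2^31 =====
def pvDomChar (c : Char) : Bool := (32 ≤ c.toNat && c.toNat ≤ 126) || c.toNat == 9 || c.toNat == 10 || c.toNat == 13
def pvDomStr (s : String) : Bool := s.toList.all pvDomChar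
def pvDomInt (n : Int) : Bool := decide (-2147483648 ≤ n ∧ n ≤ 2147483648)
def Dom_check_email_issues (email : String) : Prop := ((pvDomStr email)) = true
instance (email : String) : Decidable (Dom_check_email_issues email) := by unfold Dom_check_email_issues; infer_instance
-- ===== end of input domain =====

-- B extracts the key 'local-part + @' once (find + slice) and does a single set lookup
-- instead of A's per-prefix startswith scan; objective: simpler.

-- ===== PORT A =====
def BAD_EMAIL_PREFIXES : List String :=
  ["info@", "contact@", "office@", "admin@", "hello@", "team@",
   "sales@", "support@", "general@", "inquiries@", "mail@"]

-- A's for-loop with break: return the message for the FIRST matching prefix.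
def checkLoopA (email email_lower : String) : List String → List String
  | [] => []
  | p :: rest =>
    if PySem.Str.startswith email_lower p then
      ["Generic email prefix '" ++ p ++ "': '" ++ email ++ "'"]
    else checkLoopA email email_lower rest

def check_email_issues (email : String) : List String :=
  let email_lower := PySem.Str.strip (PySem.Str.lower email)
  let issues := checkLoopA email email_lower BAD_EMAIL_PREFIXES
  if PySem.Str.strip email == "" then issues ++ ["Email is empty"] else issues

-- ===== PORT B =====
def BAD_EMAIL_KEYS : PySem.Set String :=
  PySem.Set.ofList ["info@", "contact@", "office@", "admin@", "hello@", "team@",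
   "sales@", "support@", "general@", "inquiries@", "mail@"]

def check_email_issues_alt (email : String) : List String :=
  let email_lower := PySem.Str.strip (PySem.Str.lower email)
  let a := PySem.Str.find email_lower "@"
  let issues :=
    if a ≠ -1 then
      let key := PySem.Str.slice email_lower none (some (a + 1))
      if PySem.Set.contains BAD_EMAIL_KEYS key then
        ["Generic email prefix '" ++ key ++ "': '" ++ email ++ "'"]
      else []
    else []
  if PySem.Str.strip email == "" then issues ++ ["Email is empty"] else issues

-- ===== PRECONDITION & SPEC =====
def Spec_check_email_issues (email : String) (out : List String) : Prop := out = check_email_issues_alt email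
instance (email : String) (out : List String) : Decidable (Spec_check_email_issues email out) := by unfold Spec_check_email_issues; infer_instance

-- ===== CLAIM (what is proved, stated in full; the proofs are below) =====
def Claim_equal_check_email_issues : Prop := ∀ (email : String), Dom_check_email_issues email → Spec_check_email_issues email (check_email_issues email)

-- ===== LEMMAS AND PROOFS =====

-- cs decomposes at its first '@'
theorem split_at_first_at (cs : List Char) (h : '@' ∈ cs) :
    ∃ r, cs = cs.takeWhile (fun c => c != '@') ++ '@' :: r := by
  induction cs with
  | nil => cases h
  | cons c t ih =>
    by_cases hc : c = '@'
    · exact ⟨t, by simp [hc]⟩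
    · have hm : '@' ∈ t := by
        rcases List.mem_cons.1 h with h1 | h1
        · exact absurd h1.symm hc
        · exact h1
      rcases ih hm with ⟨r, hr⟩
      refine ⟨r, ?_⟩
      simp [List.takeWhile_cons, hc]
      exact hr

theorem no_at_in_takeWhile (cs : List Char) : '@' ∉ cs.takeWhile (fun c => c != '@') := by
  intro hmem
  have := List.mem_takeWhile_imp hmem
  simp at this

-- prefix-ending-in-@ characterisation via takeWhile
theorem prefix_at_iff (l cs : List Char) (hl : '@' ∉ l) :
    ((l ++ ['@']) <+: cs) ↔ ('@' ∈ cs ∧ cs.takeWhile (fun c => c != '@') = l) := by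
  constructor
  · rintro ⟨r, hr⟩
    have hcs : cs = l ++ '@' :: r := by simpa using hr.symm
    subst hcs
    refine ⟨by simp, ?_⟩
    have hstep : (l ++ '@' :: r).takeWhile (fun c => c != '@') =
        l ++ ('@' :: r).takeWhile (fun c => c != '@') := by
      induction l with
      | nil => simp
      | cons a t ih =>
        have ha : a ≠ '@' := fun h => hl (by simp [h])
        have ht : '@' ∉ t := fun h => hl (by simp [h])
        simp [List.takeWhile_cons, ha, ih ht]
    simp [hstep, List.takeWhile_cons]
  · rintro ⟨hm, hk⟩
    rcases split_at_first_at cs hm with ⟨r, hr⟩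
    exact ⟨r, by rw [hr, hk]; simp⟩

-- the first '@' is at index (takeWhile).length
theorem find_at_eq (cs : List Char) (h : '@' ∈ cs) :
    PySem.Chars.find cs ['@'] = ((cs.takeWhile (fun c => c != '@')).length : Int) := by
  rcases split_at_first_at cs h with ⟨r, hr⟩
  set k := cs.takeWhile (fun c => c != '@') with hkdef
  have hinf : ['@'] <:+: cs := ⟨k, r, by rw [hr]; simp⟩
  have hnn : 0 ≤ PySem.Chars.find cs ['@'] := (PySem.Chars.find_nonneg_iff cs ['@']).2 hinf
  rcases PySem.Chars.find_spec (s := cs) (sub := ['@']) hnn with ⟨hpre, hmin⟩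
  have hpk : ['@'] <+: cs.drop k.length := by
    rw [hr]; exact ⟨r, by simp⟩
  have hmink : ∀ i, i < k.length → ¬ (['@'] <+: cs.drop i) := by
    intro i hi hcontra
    rcases hcontra with ⟨r', hr'⟩
    have hdrop : cs.drop i = k.drop i ++ '@' :: r := by
      rw [hr, List.drop_append_of_le_length (le_of_lt hi)]
    cases hd : k.drop i with
    | nil =>
      have : k.length ≤ i := by
        have := List.drop_eq_nil_iff.mp hd
        omega
      omega
    | cons c t =>
      rw [hdrop, hd] at hr'
      simp only [List.cons_append, List.singleton_append, List.cons.injEq] at hr'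
      have hck : c ∈ k := List.mem_of_mem_drop (by rw [hd]; exact List.mem_cons_self)
      have hnk := no_at_in_takeWhile cs
      rw [← hkdef] at hnk
      exact hnk (by rw [hr'.1]; exact hck)
  have hle1 : ¬ ((PySem.Chars.find cs ['@']).toNat < k.length) := fun hlt => hmink _ hlt hpre
  have hle2 : ¬ (k.length < (PySem.Chars.find cs ['@']).toNat) := fun hlt => hmin _ hlt hpk
  omega

theorem take_key_eq (cs : List Char) (h : '@' ∈ cs) :
    cs.take ((cs.takeWhile (fun c => c != '@')).length + 1) =
      cs.takeWhile (fun c => c != '@') ++ ['@'] := by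
  rcases split_at_first_at cs h with ⟨r, hr⟩
  set k := cs.takeWhile (fun c => c != '@') with hk
  calc cs.take (k.length + 1) = (k ++ '@' :: r).take (k.length + 1) := by rw [← hr]
    _ = k ++ ['@'] := by rw [List.take_append]; simp

-- A's startswith test coincides with comparing B's key against the prefix
theorem sw_eq_keyEq (s p key : String) (l : List Char) (hl : '@' ∉ l)
    (hpl : p.toList = l ++ ['@']) (hm : '@' ∈ s.toList)
    (hkeyl : key.toList = s.toList.takeWhile (fun c => c != '@') ++ ['@']) :
    PySem.Str.startswith s p = (key == p) := by
  have hiff : (PySem.Str.startswith s p = true) ↔ ((key == p) = true) := by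
    rw [PySem.Str.startswith_eq, PySem.Chars.startswith_iff, hpl, prefix_at_iff _ _ hl,
      beq_iff_eq]
    constructor
    · rintro ⟨-, hkl⟩
      apply String.toList_inj.mp
      rw [hkeyl, hpl, hkl]
    · intro hkp
      refine ⟨hm, ?_⟩
      have h2 : s.toList.takeWhile (fun c => c != '@') ++ ['@'] = l ++ ['@'] := by
        rw [← hkeyl, hkp, hpl]
      simpa using h2
  cases hA : PySem.Str.startswith s p <;> cases hB : (key == p) <;> simp_all

-- A's loop when every condition coincides with a key comparison
theorem loop_eq_key (email s key : String) (L : List String)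
    (h : ∀ p ∈ L, PySem.Str.startswith s p = (key == p)) :
    checkLoopA email s L =
      if L.contains key then ["Generic email prefix '" ++ key ++ "': '" ++ email ++ "'"]
      else [] := by
  induction L with
  | nil => simp [checkLoopA]
  | cons p rest ih =>
    have hp := h p (by simp)
    by_cases hkey : key = p
    · subst hkey
      have hp' : PySem.Str.startswith s key = true := by rw [hp]; simp
      rw [PySem.Str.startswith_eq] at hp'
      simp [checkLoopA, hp']
    · have hfalse : (key == p) = false := by simp [hkey]
      rw [checkLoopA, hp, hfalse]
      simp only [Bool.false_eq_true, if_false]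
      rw [ih (fun q hq => h q (by simp [hq]))]
      simp [hkey]

theorem loop_no_match (email s : String) (L : List String)
    (h : ∀ p ∈ L, PySem.Str.startswith s p = false) :
    checkLoopA email s L = [] := by
  induction L with
  | nil => simp [checkLoopA]
  | cons p rest ih =>
    rw [checkLoopA, h p (by simp)]
    simp only [Bool.false_eq_true, if_false]
    exact ih (fun q hq => h q (by simp [hq]))

-- the generic-prefix issue lists of the two programs agree (s plays email_lower's role)
theorem core_issues_eq (email s : String) :
    checkLoopA email s BAD_EMAIL_PREFIXES =
      (if PySem.Str.find s "@" ≠ -1 then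
        (if PySem.Set.contains BAD_EMAIL_KEYS
              (PySem.Str.slice s none (some (PySem.Str.find s "@" + 1))) then
          ["Generic email prefix '" ++
            PySem.Str.slice s none (some (PySem.Str.find s "@" + 1)) ++ "': '" ++ email ++ "'"]
        else [])
      else []) := by
  by_cases hm : '@' ∈ s.toList
  · set k := s.toList.takeWhile (fun c => c != '@') with hk
    have hfind : PySem.Str.find s "@" = (k.length : Int) := by
      have := find_at_eq s.toList hm
      simpa [PySem.Str.find] using this
    have hne : PySem.Str.find s "@" ≠ -1 := by rw [hfind]; omega
    set key := PySem.Str.slice s none (some (PySem.Str.find s "@" + 1)) with hkey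
    have hkeyl : key.toList = k ++ ['@'] := by
      rw [hkey, hfind]
      have h1 : ((k.length : Int) + 1) = ((k.length + 1 : Nat) : Int) := by push_cast; ring
      rw [h1, PySem.Str.toList_slice]
      simp only [PySem.Chars.slice_eq_listSlice]
      rw [PySem.List.slice_to_natCast]
      exact take_key_eq s.toList hm
    have hcond : ∀ p ∈ BAD_EMAIL_PREFIXES, PySem.Str.startswith s p = (key == p) := by
      intro p hp
      fin_cases hp
      · exact sw_eq_keyEq s _ key ("info".toList) (by decide) (by decide) hm hkeyl
      · exact sw_eq_keyEq s _ key ("contact".toList) (by decide) (by decide) hm hkeyl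
      · exact sw_eq_keyEq s _ key ("office".toList) (by decide) (by decide) hm hkeyl
      · exact sw_eq_keyEq s _ key ("admin".toList) (by decide) (by decide) hm hkeyl
      · exact sw_eq_keyEq s _ key ("hello".toList) (by decide) (by decide) hm hkeyl
      · exact sw_eq_keyEq s _ key ("team".toList) (by decide) (by decide) hm hkeyl
      · exact sw_eq_keyEq s _ key ("sales".toList) (by decide) (by decide) hm hkeyl
      · exact sw_eq_keyEq s _ key ("support".toList) (by decide) (by decide) hm hkeyl
      · exact sw_eq_keyEq s _ key ("general".toList) (by decide) (by decide) hm hkeyl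
      · exact sw_eq_keyEq s _ key ("inquiries".toList) (by decide) (by decide) hm hkeyl
      · exact sw_eq_keyEq s _ key ("mail".toList) (by decide) (by decide) hm hkeyl
    rw [loop_eq_key email s key BAD_EMAIL_PREFIXES hcond, if_pos hne]
    have hset : PySem.Set.contains BAD_EMAIL_KEYS key = BAD_EMAIL_PREFIXES.contains key := by
      have h1 : (PySem.Set.contains BAD_EMAIL_KEYS key = true) ↔ key ∈ BAD_EMAIL_PREFIXES := by
        rw [PySem.Set.contains_iff]
        exact PySem.Set.mem_ofList BAD_EMAIL_PREFIXES key
      have h2 : (BAD_EMAIL_PREFIXES.contains key = true) ↔ key ∈ BAD_EMAIL_PREFIXES :=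
        List.contains_iff_mem
      cases hA : PySem.Set.contains BAD_EMAIL_KEYS key <;>
        cases hB : BAD_EMAIL_PREFIXES.contains key <;> simp_all
    rw [hset]
  · have hfind : PySem.Str.find s "@" = -1 := by
      rw [PySem.Str.find_eq_neg_one_iff]
      intro hinf
      rcases hinf with ⟨pre, suf, hps⟩
      exact hm (by rw [← hps]; simp)
    have hA : checkLoopA email s BAD_EMAIL_PREFIXES = [] := by
      apply loop_no_match
      intro p hp
      have hat : '@' ∈ p.toList := by fin_cases hp <;> decide
      cases hsw : PySem.Str.startswith s p
      · rfl
      · exfalso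
        rw [PySem.Str.startswith_eq, PySem.Chars.startswith_iff] at hsw
        exact hm (hsw.subset hat)
    rw [hA, if_neg (fun hc => hc hfind)]

-- ===== VERDICT (by name: the statement is the Claim_ definition above) =====
theorem check_email_issues_spec : Claim_equal_check_email_issues := by
  intro email _
  unfold Spec_check_email_issues
  simp only [check_email_issues, check_email_issues_alt]
  rw [core_issues_eq email (PySem.Str.strip (PySem.Str.lower email))]
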